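-- pv_equiv track=rewrite | github.com/introduction-to-python-2026/tutorial-4-OrGutman | orf.py | find_first_in_register_stop
-- ===== SOURCE A (Python) =====
-- def find_first_in_register_stop(seq):
--     stop_codons = {"TGA", "TAG", "TAA"}
--     start = seq.find("ATG")
--     if start == -1:
--         return -1
--     for i in range(start + 3, len(seq) - 2):
--         if seq[i:i+3] in stop_codons:
--             if (i - start) % 3 == 0:
--                 return i + 3
--     return -1
-- ===== SOURCE B (Python) =====
-- def find_first_in_register_stop(seq):
--     stop_codons = {"TGA", "TAG", "TAA"}
--     start = seq.find("ATG")
--     if start == -1: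
--         return -1
--     codons = [seq[j:j+3] for j in range(start, len(seq) - 2, 3)]
--     for idx, codon in enumerate(codons):
--         if codon in stop_codons:
--             return start + 3 * idx + 3
--     return -1
-- ===== Notes on version B (the rewrite author's own statement) =====
-- stated objective: alternative
-- what changed: Instead of scanning every position after ATG and filtering with a modulo-3 guard, B materializes only the in-frame codons (stride-3 slicing from the start codon) and searches that codon list for the first stop, converting the codon index back to a sequence position.
import Mathlib
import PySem

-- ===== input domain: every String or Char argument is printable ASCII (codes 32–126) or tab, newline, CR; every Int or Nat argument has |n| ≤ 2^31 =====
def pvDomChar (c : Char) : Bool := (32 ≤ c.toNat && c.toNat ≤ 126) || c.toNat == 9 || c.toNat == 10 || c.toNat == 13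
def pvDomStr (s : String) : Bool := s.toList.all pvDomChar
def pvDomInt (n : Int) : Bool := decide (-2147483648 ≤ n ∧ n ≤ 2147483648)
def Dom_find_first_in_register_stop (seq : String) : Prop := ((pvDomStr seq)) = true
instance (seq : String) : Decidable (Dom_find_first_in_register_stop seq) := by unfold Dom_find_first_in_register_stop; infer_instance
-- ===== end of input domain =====

-- B replaces A's position-by-position scan with a modulo-3 guard by a two-phase decomposition:
-- extract the in-frame codon list (stride-3 slices from the ATG), then search it for the first stop codon.

-- ===== PORT A =====
-- A's for-loop over range(start+3, len(seq)-2) with early return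
def pvGoA (seq : String) (stops : PySem.Set String) (start : Int) : List Int → Int
  | [] => -1
  | i :: rest =>
    if PySem.Set.contains stops (PySem.Str.slice seq (some i) (some (i + 3))) then
      if PySem.Int.mod (i - start) 3 == 0 then i + 3
      else pvGoA seq stops start rest
    else pvGoA seq stops start rest

def find_first_in_register_stop (seq : String) : Int :=
  let stop_codons : PySem.Set String := PySem.Set.ofList ["TGA", "TAG", "TAA"]
  let start := PySem.Str.find seq "ATG"
  if start == -1 then -1
  else pvGoA seq stop_codons start (PySem.List.pyRange (start + 3) (PySem.Str.len seq - 2) 1)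

-- ===== PORT B =====
-- B's for-loop over enumerate(codons) with early return
def pvScanB (stops : PySem.Set String) (start : Int) : List (Int × String) → Int
  | [] => -1
  | (idx, codon) :: rest =>
    if PySem.Set.contains stops codon then start + 3 * idx + 3
    else pvScanB stops start rest

def find_first_in_register_stop_alt (seq : String) : Int :=
  let stop_codons : PySem.Set String := PySem.Set.ofList ["TGA", "TAG", "TAA"]
  let start := PySem.Str.find seq "ATG"
  if start == -1 then -1
  else
    let codons := (PySem.List.pyRange start (PySem.Str.len seq - 2) 3).map
      (fun j => PySem.Str.slice seq (some j) (some (j + 3)))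
    pvScanB stop_codons start (PySem.List.enumerate codons 0)

-- ===== PRECONDITION & SPEC =====
def Spec_find_first_in_register_stop (seq : String) (out : Int) : Prop := out = find_first_in_register_stop_alt seq
instance (seq : String) (out : Int) : Decidable (Spec_find_first_in_register_stop seq out) := by unfold Spec_find_first_in_register_stop; infer_instance

-- ===== CLAIM (what is proved, stated in full; the proofs are below) =====
def Claim_equal_find_first_in_register_stop : Prop := ∀ (seq : String), Dom_find_first_in_register_stop seq → Spec_find_first_in_register_stop seq (find_first_in_register_stop seq)

-- ===== LEMMAS AND PROOFS =====

-- stride-3 range: the induction forms (instances of PySem.List.pyRange_of_pos)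
lemma pvRange3_nil (a b : Int) (h : b ≤ a) : PySem.List.pyRange a b 3 = [] := by
  rw [PySem.List.pyRange_of_pos a b (by norm_num)]
  simp [if_neg (by omega : ¬ a < b)]

lemma pvRange3_cons (a b : Int) (h : a < b) :
    PySem.List.pyRange a b 3 = a :: PySem.List.pyRange (a + 3) b 3 := by
  rw [PySem.List.pyRange_of_pos a b (by norm_num),
      PySem.List.pyRange_of_pos (a + 3) b (by norm_num)]
  have hN : (if a < b then ((b - a + 3 - 1) / 3).toNat else 0)
      = (if a + 3 < b then ((b - (a + 3) + 3 - 1) / 3).toNat else 0) + 1 := by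
    split_ifs <;> omega
  rw [hN, List.range_succ_eq_map]
  simp only [List.map_cons, List.map_map]
  refine congrArg₂ _ (by norm_num) ?_
  exact List.map_congr_left (fun k _ => by
    simp only [Function.comp_apply]; push_cast; ring)

-- A skips any position that is out of frame
lemma pvSkipA (seq : String) (stops : PySem.Set String) (start m j : Int)
    (h : ¬ (3 ∣ (j - start))) :
    pvGoA seq stops start (PySem.List.pyRange j m 1)
      = pvGoA seq stops start (PySem.List.pyRange (j + 1) m 1) := by
  by_cases hj : j < m
  · rw [PySem.List.pyRange_one_cons hj]
    have hmod : (PySem.Int.mod (j - start) 3 == 0) = false := by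
      simp only [beq_eq_false_iff_ne, ne_eq, PySem.Int.mod_eq_zero_iff_dvd]
      exact h
    simp only [pvGoA, hmod, Bool.false_eq_true, if_false]
    split <;> rfl
  · rw [PySem.List.pyRange_one_eq_nil (by omega), PySem.List.pyRange_one_eq_nil (by omega)]

-- main loop correspondence: A scanning from an in-frame position i = start + 3*idx
-- equals B scanning the stride-3 codon list from index idx
lemma pvMain (seq : String) (stops : PySem.Set String) (start m : Int) :
    ∀ (fuel : Nat) (i idx : Int), (m - i).toNat ≤ fuel → i = start + 3 * idx →
    pvGoA seq stops start (PySem.List.pyRange i m 1)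
      = pvScanB stops start (PySem.List.enumerate
          ((PySem.List.pyRange i m 3).map
            (fun j => PySem.Str.slice seq (some j) (some (j + 3)))) idx) := by
  intro fuel
  induction fuel with
  | zero =>
    intro i idx hf hidx
    rw [PySem.List.pyRange_one_eq_nil (by omega), pvRange3_nil i m (by omega)]
    rfl
  | succ n ih =>
    intro i idx hf hidx
    by_cases hi : i < m
    · rw [PySem.List.pyRange_one_cons hi, pvRange3_cons i m hi]
      simp only [List.map_cons, PySem.List.enumerate_cons]
      by_cases hc : PySem.Set.contains stops (PySem.Str.slice seq (some i) (some (i + 3))) = true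
      · have hmod : (PySem.Int.mod (i - start) 3 == 0) = true := by
          simp only [beq_iff_eq, PySem.Int.mod_eq_zero_iff_dvd]
          exact ⟨idx, by omega⟩
        simp only [pvGoA, pvScanB, hc, hmod, if_true]
        omega
      · simp only [pvGoA, pvScanB, hc, Bool.false_eq_true, if_false]
        rw [pvSkipA seq stops start m (i + 1) (by rintro ⟨k, hk⟩; omega)]
        rw [show i + 1 + 1 = i + 2 by ring]
        rw [pvSkipA seq stops start m (i + 2) (by rintro ⟨k, hk⟩; omega)]
        rw [show i + 2 + 1 = i + 3 by ring]
        exact ih (i + 3) (idx + 1) (by omega) (by omega)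
    · rw [PySem.List.pyRange_one_eq_nil (by omega), pvRange3_nil i m (by omega)]
      rfl

-- the codon at the position seq.find("ATG") is literally "ATG"
lemma pvSliceAtFind (seq : String) (h : PySem.Str.find seq "ATG" ≠ -1) :
    PySem.Str.slice seq (some (PySem.Str.find seq "ATG"))
      (some (PySem.Str.find seq "ATG" + 3)) = "ATG" := by
  have hge : 0 ≤ PySem.Chars.find seq.toList "ATG".toList := by
    have := PySem.Chars.neg_one_le_find seq.toList "ATG".toList
    rw [PySem.Str.find_eq] at h
    omega
  obtain ⟨hpre, -⟩ := PySem.Chars.find_spec hge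
  obtain ⟨t, ht⟩ := hpre
  set f : Int := PySem.Chars.find seq.toList "ATG".toList with hf
  apply String.toList_injective
  have hslice : (PySem.Str.slice seq (some f) (some (f + 3))).toList
      = PySem.List.slice seq.toList (some f) (some (f + 3)) := by
    simp [PySem.Str.slice, PySem.Chars.slice]
  rw [PySem.Str.find_eq, ← hf, hslice,
      PySem.List.slice_toNat seq.toList hge (by omega)]
  have h3 : (f + 3).toNat - f.toNat = 3 := by omega
  rw [h3, ← ht]
  simp

-- ===== VERDICT (by name: the statement is the Claim_ definition above) =====
theorem find_first_in_register_stop_spec : Claim_equal_find_first_in_register_stop := by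
  intro seq _
  unfold Spec_find_first_in_register_stop
  unfold find_first_in_register_stop find_first_in_register_stop_alt
  by_cases hfind : PySem.Str.find seq "ATG" = -1
  · have hbeq : (PySem.Str.find seq "ATG" == -1) = true := beq_iff_eq.mpr hfind
    simp only [hbeq, if_true]
  · have hbeq : (PySem.Str.find seq "ATG" == -1) = false := by
      simp only [beq_eq_false_iff_ne, ne_eq]; exact hfind
    simp only [hbeq, Bool.false_eq_true, if_false]
    set start := PySem.Str.find seq "ATG" with hstart
    set m := PySem.Str.len seq - 2 with hm
    by_cases hsm : start < m
    · rw [pvRange3_cons start m hsm]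
      simp only [List.map_cons, PySem.List.enumerate_cons]
      have hatg : PySem.Set.contains (PySem.Set.ofList ["TGA", "TAG", "TAA"])
          (PySem.Str.slice seq (some start) (some (start + 3))) = false := by
        rw [hstart, pvSliceAtFind seq hfind]
        decide
      simp only [pvScanB, hatg, Bool.false_eq_true, if_false]
      exact pvMain seq (PySem.Set.ofList ["TGA", "TAG", "TAA"]) start m
        (m - (start + 3)).toNat (start + 3) 1 (by omega) (by omega)
    · rw [PySem.List.pyRange_one_eq_nil (by omega), pvRange3_nil start m (by omega)]
      rfl
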